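-- pv_equiv track=rewrite | github.com/jpmab/jogo_da_forca | jogo_da_forca.py | mascara_palavra
-- ===== SOURCE A (Python) =====
-- def mascara_palavra(palavra):
--     '''Dada a palavra resposta, retorna ela em formato censurado. Ex.: palavra = 'teste', palavra censurada = -----.
--
--     str -> str'''
--
--     palavra_censurada = len(palavra)*'-'            # Cria a máscara da palavra
--
--     if ' ' in palavra:                              # Soluciona o problema para caso a palavra seja composta(tenha espaço)
--         modifica = list(palavra_censurada)          # Cria uma variável temporária em formato de lista para alterarmos os elementos
--
--         for indice in range(len(palavra)):
--             if palavra[indice] == ' ':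
--                 modifica[indice] = ' '              # Modifica o '-' da máscara da palavra por ' ' na exata posição do espaço
--
--         palavra_censurada = ''.join(modifica)       # Transforma novamente a variável temporária em string e a associamos com a palavra censurada
--
--     return palavra_censurada
-- ===== SOURCE B (Python) =====
-- def mascara_palavra(palavra):
--     '''Dada a palavra resposta, retorna ela em formato censurado. Ex.: palavra = 'teste', palavra censurada = -----.
--
--     str -> str'''
--     return ' '.join('-' * len(parte) for parte in palavra.split(' '))
-- ===== Notes on version B (the rewrite author's own statement) =====
-- stated objective: simpler
-- what changed: B splits the word on single spaces and rejoins a run of dashes per segment, instead of building a full dash mask and patching each space position through an index loop.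
import Mathlib
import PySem

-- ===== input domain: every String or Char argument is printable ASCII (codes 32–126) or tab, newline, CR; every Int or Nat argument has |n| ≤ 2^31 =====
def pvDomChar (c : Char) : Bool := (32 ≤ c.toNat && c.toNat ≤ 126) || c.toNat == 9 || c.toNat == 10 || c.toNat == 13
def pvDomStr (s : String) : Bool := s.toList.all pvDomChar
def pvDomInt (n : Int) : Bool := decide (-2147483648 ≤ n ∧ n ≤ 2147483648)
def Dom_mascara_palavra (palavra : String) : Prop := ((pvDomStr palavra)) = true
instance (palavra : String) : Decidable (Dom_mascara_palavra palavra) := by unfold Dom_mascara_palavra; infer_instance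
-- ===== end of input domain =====

-- B censors by splitting on single spaces and rejoining dash-runs per segment,
-- instead of A's dash mask patched at each space index: a simpler decomposition.


-- ===== PORT A =====
def mascara_palavra (palavra : String) : String :=
  let cs := palavra.toList
  let palavra_censurada := List.replicate cs.length '-'   -- len(palavra)*'-'
  if PySem.Chars.isIn [' '] cs then                        -- ' ' in palavra
    let modifica := (PySem.List.pyRange 0 (cs.length : Int) 1).foldl
      (fun m indice =>
        if PySem.List.pyGetD cs indice ' ' = ' '           -- palavra[indice] == ' '
        then PySem.List.pySetD m indice ' '                -- modifica[indice] = ' '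
        else m)
      palavra_censurada
    String.mk modifica                                     -- ''.join(modifica)
  else
    String.mk palavra_censurada

-- ===== PORT B =====
def mascara_palavra_alt (palavra : String) : String :=
  String.mk (PySem.Chars.join [' ']
    ((PySem.Chars.splitOn palavra.toList [' ']).map
      (fun parte => List.replicate parte.length '-')))     -- ' '.join('-'*len(parte) ...)

-- ===== PRECONDITION & SPEC =====
def Spec_mascara_palavra (palavra : String) (out : String) : Prop := out = mascara_palavra_alt palavra
instance (palavra : String) (out : String) : Decidable (Spec_mascara_palavra palavra out) := by unfold Spec_mascara_palavra; infer_instance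

-- ===== CLAIM (what is proved, stated in full; the proofs are below) =====
def Claim_equal_mascara_palavra : Prop := ∀ (palavra : String), Dom_mascara_palavra palavra → Spec_mascara_palavra palavra (mascara_palavra palavra)

-- ===== LEMMAS AND PROOFS =====

-- the character-wise censoring function both programs compute
def pvF (c : Char) : Char := if c = ' ' then ' ' else '-'

-- structural version of splitting on a single space, with the current (reversed) segment
def pvSp (cur : List Char) : List Char → List (List Char)
  | [] => [cur.reverse]
  | c :: rest => if c = ' ' then cur.reverse :: pvSp [] rest else pvSp (c :: cur) rest

theorem pvSp_ne_nil (cs cur : List Char) : pvSp cur cs ≠ [] := by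
  induction cs generalizing cur with
  | nil => simp [pvSp]
  | cons c rest ih =>
    by_cases h : c = ' ' <;> simp [pvSp, h, ih]

theorem pvGo_eq (fuel : Nat) (cs cur : List Char) (accs : List (List Char))
    (h : cs.length < fuel) :
    PySem.Chars.splitOn.go [' '] fuel cs cur accs = accs.reverse ++ pvSp cur cs := by
  induction fuel generalizing cs cur accs with
  | zero => omega
  | succ fuel ih =>
    cases cs with
    | nil => simp [PySem.Chars.splitOn.go, pvSp]
    | cons c rest =>
      by_cases hc : c = ' '
      · subst hc
        have hp : [' '].isPrefixOf (' ' :: rest) = true := by simp [List.isPrefixOf]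
        simp only [PySem.Chars.splitOn.go, hp, List.length_singleton,
          List.drop_succ_cons, List.drop_zero, if_true]
        rw [ih rest [] (cur.reverse :: accs) (by simpa using Nat.lt_of_succ_lt_succ h)]
        simp [pvSp]
      · have hp : [' '].isPrefixOf (c :: rest) = false := by
          simp [List.isPrefixOf]; exact fun hh => hc hh.symm
        simp only [PySem.Chars.splitOn.go, hp, Bool.false_eq_true, if_false]
        rw [ih rest (c :: cur) accs (by simpa using Nat.lt_of_succ_lt_succ h)]
        simp [pvSp, hc]

theorem pvSplitOn_eq (cs : List Char) :
    PySem.Chars.splitOn cs [' '] = pvSp [] cs := by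
  unfold PySem.Chars.splitOn
  rw [pvGo_eq (cs.length + 1) cs [] [] (by omega)]
  simp

theorem pvIntercalate_cons_cons (s a b : List Char) (l : List (List Char)) :
    s.intercalate (a :: b :: l) = a ++ s ++ s.intercalate (b :: l) := by
  simp [List.intercalate, List.intersperse]

theorem pvJoin_sp (cs : List Char) (cur : List Char) :
    [' '].intercalate ((pvSp cur cs).map (fun seg => List.replicate seg.length '-'))
      = List.replicate cur.length '-' ++ cs.map pvF := by
  induction cs generalizing cur with
  | nil => simp [pvSp, List.intercalate]
  | cons c rest ih =>
    by_cases hc : c = ' '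
    · subst hc
      obtain ⟨d, ds, hds⟩ : ∃ d ds, pvSp ([] : List Char) rest = d :: ds := by
        cases hsp : pvSp ([] : List Char) rest with
        | nil => exact absurd hsp (pvSp_ne_nil rest [])
        | cons d ds => exact ⟨d, ds, rfl⟩
      have ihr := ih ([] : List Char)
      rw [hds] at ihr
      simp only [List.map_cons] at ihr
      rw [show pvSp cur (' ' :: rest) = cur.reverse :: pvSp [] rest from by simp [pvSp],
        hds, List.map_cons, List.map_cons, pvIntercalate_cons_cons, ihr]
      simp [pvF]
    · simp only [pvSp, if_neg hc]
      rw [ih (c :: cur)]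
      have hfc : pvF c = '-' := by simp [pvF, hc]
      simp [hfc, List.replicate_succ']

theorem pvAlt_eq (palavra : String) :
    mascara_palavra_alt palavra = String.mk (palavra.toList.map pvF) := by
  unfold mascara_palavra_alt
  rw [pvSplitOn_eq]
  show String.mk ([' '].intercalate _) = _
  rw [pvJoin_sp]
  simp

theorem pvNoSpace (cs : List Char) (h : ' ' ∉ cs) :
    cs.map pvF = List.replicate cs.length '-' := by
  induction cs with
  | nil => simp
  | cons c rest ih =>
    simp only [List.mem_cons, not_or] at h
    simp [pvF, List.replicate_succ, ih h.2]
    intro hc; exact h.1 hc.symm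

theorem pvMask (cs : List Char) (k : Nat) (hk : k ≤ cs.length) :
    (PySem.List.pyRange 0 (k : Int) 1).foldl
      (fun m indice =>
        if PySem.List.pyGetD cs indice ' ' = ' '
        then PySem.List.pySetD m indice ' '
        else m)
      (List.replicate cs.length '-')
      = (cs.take k).map pvF ++ List.replicate (cs.length - k) '-' := by
  induction k with
  | zero => simp [PySem.List.pyRange_one_eq_nil]
  | succ k ih =>
    have hk' : k ≤ cs.length := by omega
    have hklt : k < cs.length := by omega
    have hcast : ((k + 1 : Nat) : Int) = (k : Int) + 1 := by push_cast; ring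
    rw [hcast, PySem.List.pyRange_one_succ_right (by positivity), List.foldl_append]
    rw [ih hk']
    simp only [List.foldl_cons, List.foldl_nil]
    have hget : PySem.List.pyGetD cs (k : Int) ' ' = cs[k] := by
      rw [PySem.List.pyGetD_of_nonneg _ _ (by positivity)]
      simp [List.getD_eq_getElem?_getD, List.getElem?_eq_getElem hklt]
    have hset : PySem.List.pySetD ((cs.take k).map pvF ++ List.replicate (cs.length - k) '-') (k : Int) ' '
        = ((cs.take k).map pvF ++ List.replicate (cs.length - k) '-').set k ' ' := by
      simp
    have hlen : ((cs.take k).map pvF).length = k := by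
      simp [List.length_take, Nat.min_eq_left hk']
    have hrep : List.replicate (cs.length - k) '-' = '-' :: List.replicate (cs.length - (k+1)) '-' := by
      have : cs.length - k = (cs.length - (k+1)) + 1 := by omega
      rw [this, List.replicate_succ]
    have hsetval : ∀ v : Char,
        ((cs.take k).map pvF ++ List.replicate (cs.length - k) '-').set k v
          = (cs.take k).map pvF ++ v :: List.replicate (cs.length - (k+1)) '-' := by
      intro v
      rw [List.set_append, if_neg (by omega), hlen, Nat.sub_self, hrep, List.set_cons_zero]
    have htake : cs.take (k+1) = cs.take k ++ [cs[k]] := by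
      rw [List.take_succ, List.getElem?_eq_getElem hklt]; rfl
    by_cases hsp : cs[k] = ' '
    · rw [if_pos (by rw [hget]; exact hsp), hset, hsetval]
      rw [htake]
      simp [pvF, hsp]
    · rw [if_neg (by rw [hget]; exact hsp)]
      rw [htake, hrep]
      simp only [List.map_append, List.map_cons, List.map_nil]
      have : pvF cs[k] = '-' := by simp [pvF, hsp]
      rw [this]
      simp

theorem pvMem_of_isIn (cs : List Char) (h : PySem.Chars.isIn [' '] cs = false) : ' ' ∉ cs := by
  intro hmem
  rw [PySem.Chars.isIn_eq_false_iff] at h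
  apply h
  obtain ⟨pre, suf, rfl⟩ := List.mem_iff_append.mp hmem
  exact ⟨pre, suf, by simp⟩

-- ===== VERDICT (by name: the statement is the Claim_ definition above) =====
theorem mascara_palavra_spec : Claim_equal_mascara_palavra := by
  intro palavra _
  unfold Spec_mascara_palavra
  rw [pvAlt_eq]
  unfold mascara_palavra
  by_cases hin : PySem.Chars.isIn [' '] palavra.toList
  · simp only [hin, if_true]
    rw [pvMask palavra.toList palavra.toList.length (le_refl _)]
    simp [List.take_of_length_le]
  · simp only [Bool.not_eq_true] at hin
    simp only [hin, Bool.false_eq_true, if_false]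
    rw [pvNoSpace palavra.toList (pvMem_of_isIn _ hin)]
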